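-- pv_equiv track=rewrite | github.com/E1psycongr00/Algorithm_study | 임현규/programmers/Lv2/lv2_3차_n진수게임_하.py | make_nums
-- ===== SOURCE A (Python) =====
-- def make_nth(val, n, map16):
--     answer = []
--     if val == 0:
--         answer.append(str(val))
--         return answer
--
--     while val:
--         val, mod = divmod(val, n)
--         if mod >= 10:
--             answer.append(map16[mod])
--         else:
--             answer.append(str(mod))
--     return "".join(answer[::-1])
--
-- def make_nums(n, t, m, p):
--     i = 0
--     nums = []
--     map16 = {10: "A", 11: "B", 12: "C", 13: "D", 14: "E", 15: "F"}
--     max_idx = (p - 1) + m * (t - 1)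
--     while True:
--         number = make_nth(i, n, map16)
--         nums += list(number)
--
--         if len(nums) > max_idx:
--             break
--         i += 1
--     return nums
-- ===== SOURCE B (Python) =====
-- def _inc(rev_digits, n):
--     # add 1 to a base-n odometer stored least-significant digit first
--     if not rev_digits:
--         return [1]
--     d = rev_digits[0] + 1
--     if d < n:
--         return [d] + rev_digits[1:]
--     return [0] + _inc(rev_digits[1:], n)
--
-- def make_nums(n, t, m, p):
--     map16 = {10: "A", 11: "B", 12: "C", 13: "D", 14: "E", 15: "F"}
--     max_idx = (p - 1) + m * (t - 1)
--     nums = []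
--     digits = [0]  # base-n digits of the current number, least-significant first
--     while True:
--         for d in reversed(digits):
--             nums.append(map16[d] if d >= 10 else str(d))
--         if len(nums) > max_idx:
--             return nums
--         digits = _inc(digits, n)
-- ===== Notes on version B (the rewrite author's own statement) =====
-- stated objective: alternative
-- what changed: Instead of re-converting each integer i to base n with a divmod loop, B maintains the current number as a base-n odometer digit list (least-significant first), emitting its digits and then incrementing it with carry propagation.
-- outside the precondition, e.g. on make_nums(-2, 2, 1, 1): A returns ['0', '-', '1', '-', '1'], B returns ['0', '1', '0']
import Mathlib
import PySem

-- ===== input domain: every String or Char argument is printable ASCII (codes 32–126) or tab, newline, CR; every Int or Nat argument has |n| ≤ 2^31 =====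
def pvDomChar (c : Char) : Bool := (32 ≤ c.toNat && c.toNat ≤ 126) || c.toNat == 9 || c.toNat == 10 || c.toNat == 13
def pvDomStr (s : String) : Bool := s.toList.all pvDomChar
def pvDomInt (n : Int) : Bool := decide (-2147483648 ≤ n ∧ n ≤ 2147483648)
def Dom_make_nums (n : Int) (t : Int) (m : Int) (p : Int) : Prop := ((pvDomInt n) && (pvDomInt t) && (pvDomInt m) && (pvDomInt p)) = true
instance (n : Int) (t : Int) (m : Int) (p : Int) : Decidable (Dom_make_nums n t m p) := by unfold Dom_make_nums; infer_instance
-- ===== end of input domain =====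

-- B replaces A's per-integer divmod conversion by a base-n odometer digit list that is
-- emitted and then incremented with carry propagation (objective: alternative algorithm).
-- ===== PORT A =====
def pvMap16 : PySem.Dict Int String :=
  PySem.Dict.ofList [(10, "A"), (11, "B"), (12, "C"), (13, "D"), (14, "E"), (15, "F")]

-- the 'while val:' loop of make_nth; fuel val.toNat + 1 suffices since val strictly shrinks (Pre_ gives n ≥ 2 whenever this runs)
def makeNthLoop (n : Int) : Nat → Int → List String → List String
  | 0, _, answer => answer
  | fuel + 1, val, answer =>
    if val = 0 then answer
    else
      makeNthLoop n fuel (PySem.Int.floordiv val n)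
        (answer ++ [if PySem.Int.mod val n ≥ 10 then PySem.Dict.getD pvMap16 (PySem.Int.mod val n) ""
                    else PySem.Int.toStr (PySem.Int.mod val n)])
-- map16[mod] (KeyError for a digit ≥ 16) is ported with getD ""; Pre_ excludes exactly the inputs that reach such a digit.
-- '"".join(answer[::-1])' followed by the caller's 'list(...)' re-splits into the same one-character
-- strings (under Pre_ every appended digit string is a single printable char), so it is ported as answer.reverse.
def make_nth (val : Int) (n : Int) : List String :=
  if val = 0 then [PySem.Int.toStr val]
  else (makeNthLoop n (val.toNat + 1) val []).reverse

-- the 'while True:' loop; each pass appends ≥ 1 char, so fuel max_idx.toNat + 1 is enough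
def makeNumsLoop (n : Int) (maxIdx : Int) : Nat → Int → List String → List String
  | 0, _, nums => nums
  | fuel + 1, i, nums =>
    let nums' := nums ++ make_nth i n
    if maxIdx < (nums'.length : Int) then nums'
    else makeNumsLoop n maxIdx fuel (i + 1) nums'

def make_nums (n : Int) (t : Int) (m : Int) (p : Int) : List String :=
  let maxIdx := (p - 1) + m * (t - 1)
  makeNumsLoop n maxIdx (maxIdx.toNat + 1) 0 []

-- ===== PORT B =====
def pvMap16Alt : PySem.Dict Int String :=
  PySem.Dict.ofList [(10, "A"), (11, "B"), (12, "C"), (13, "D"), (14, "E"), (15, "F")]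

-- _inc: add 1 to a base-n odometer stored least-significant digit first
def incRev (n : Int) : List Int → List Int
  | [] => [1]
  | d :: rest => if d + 1 < n then (d + 1) :: rest else 0 :: incRev n rest

-- the 'while True:' loop of B; same fuel bound as A's loop (≥ 1 char emitted per pass)
def makeNumsAltLoop (n : Int) (maxIdx : Int) : Nat → List Int → List String → List String
  | 0, _, nums => nums
  | fuel + 1, digits, nums =>
    let nums' := nums ++ digits.reverse.map (fun d =>
      if d ≥ 10 then PySem.Dict.getD pvMap16Alt d "" else PySem.Int.toStr d)
    if maxIdx < (nums'.length : Int) then nums'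
    else makeNumsAltLoop n maxIdx fuel (incRev n digits) nums'

def make_nums_alt (n : Int) (t : Int) (m : Int) (p : Int) : List String :=
  let maxIdx := (p - 1) + m * (t - 1)
  makeNumsAltLoop n maxIdx (maxIdx.toNat + 1) [0] []

-- ===== PRECONDITION & SPEC =====
-- Pre_ excludes the inputs that need more output than the initial "0" while the base is outside 2..16
-- (or the base is ≥ 17 and a 16th number is needed): there A raises ZeroDivisionError (n = 0) or
-- KeyError (a digit value ≥ 16), loops forever (n = 1 or n = -1), or for other negative bases returns
-- accidental multi-character "digits" produced by Python's floored divmod.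
def Pre_make_nums (n : Int) (t : Int) (m : Int) (p : Int) : Prop :=
  (p - 1) + m * (t - 1) ≤ 0 ∨ (2 ≤ n ∧ (n ≤ 16 ∨ (p - 1) + m * (t - 1) ≤ 15))
instance (n : Int) (t : Int) (m : Int) (p : Int) : Decidable (Pre_make_nums n t m p) := by
  unfold Pre_make_nums; infer_instance

def pvWitness_make_nums : Int × Int × Int × Int := (2, 2, 2, 2)

def Spec_make_nums (n : Int) (t : Int) (m : Int) (p : Int) (out : List String) : Prop := out = make_nums_alt n t m p
instance (n : Int) (t : Int) (m : Int) (p : Int) (out : List String) : Decidable (Spec_make_nums n t m p out) := by unfold Spec_make_nums; infer_instance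

-- ===== CLAIM (what is proved, stated in full; the proofs are below) =====
def Claim_equal_make_nums : Prop := ∀ (n : Int) (t : Int) (m : Int) (p : Int), Dom_make_nums n t m p → Pre_make_nums n t m p → Spec_make_nums n t m p (make_nums n t m p)

-- ===== LEMMAS AND PROOFS =====

-- the character both programs emit for one digit value
def dchar (d : Int) : String :=
  if d ≥ 10 then PySem.Dict.getD pvMap16 d "" else PySem.Int.toStr d

-- B's digit state after i increments: [0] for i = 0, else the base-b digits of i, LSB first
def stateOf (b : Nat) (i : Nat) : List Int :=
  if i = 0 then [0] else (Nat.digits b i).map (fun d : Nat => (d : Int))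

theorem makeNthLoop_digits (b : Nat) (hb : 2 ≤ b) :
    ∀ (fuel k : Nat) (ans : List String), k < fuel →
      makeNthLoop (b : Int) fuel (k : Int) ans
        = ans ++ (Nat.digits b k).map (fun d : Nat => dchar (d : Int)) := by
  intro fuel
  induction fuel with
  | zero => intro k ans h; omega
  | succ f ih =>
    intro k ans h
    rcases Nat.eq_zero_or_pos k with hk | hk
    · subst hk; simp [makeNthLoop]
    · have hk0 : ((k : Int) ≠ 0) := by exact_mod_cast Nat.pos_iff_ne_zero.mp hk
      rw [makeNthLoop, if_neg hk0, PySem.Int.floordiv_natCast, PySem.Int.mod_natCast]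
      have hlt : k / b < f := lt_of_lt_of_le (Nat.div_lt_self hk (by omega)) (by omega)
      rw [ih (k / b) _ hlt]
      rw [Nat.digits_def' (by omega : 1 < b) hk]
      simp only [dchar, List.map_cons, List.append_assoc, List.cons_append, List.nil_append]

theorem make_nth_eq (b : Nat) (hb : 2 ≤ b) (k : Nat) :
    make_nth (k : Int) (b : Int) = (stateOf b k).reverse.map dchar := by
  rcases Nat.eq_zero_or_pos k with hk | hk
  · subst hk
    simp [make_nth, stateOf, dchar]
  · have hk0 : ((k : Int) ≠ 0) := by exact_mod_cast Nat.pos_iff_ne_zero.mp hk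
    rw [make_nth, if_neg hk0]
    rw [show (k : Int).toNat = k from Int.toNat_natCast k]
    rw [makeNthLoop_digits b hb (k + 1) k [] (by omega)]
    rw [stateOf, if_neg (Nat.pos_iff_ne_zero.mp hk)]
    simp [List.map_reverse, List.map_map, Function.comp]

theorem incRev_digits (b : Nat) (hb : 2 ≤ b) :
    ∀ (j : Nat), incRev (b : Int) ((Nat.digits b j).map (fun d : Nat => (d : Int)))
      = (Nat.digits b (j + 1)).map (fun d : Nat => (d : Int)) := by
  intro j
  induction j using Nat.strong_induction_on with
  | _ j ih =>
    rcases Nat.eq_zero_or_pos j with hj | hj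
    · subst hj
      simp [incRev, Nat.digits_of_lt b 1 (by omega) (by omega)]
    · rw [Nat.digits_def' (by omega : 1 < b) hj]
      have hmod : j % b < b := Nat.mod_lt _ (by omega)
      have hdm := Nat.div_add_mod j b
      by_cases hc : j % b + 1 < b
      · -- no carry: last digit bumps, the rest is unchanged
        rw [List.map_cons, incRev, if_pos (by exact_mod_cast hc)]
        have h1 : (j + 1) % b = j % b + 1 := by
          have he : j + 1 = b * (j / b) + (j % b + 1) := by omega
          rw [he, Nat.mul_add_mod, Nat.mod_eq_of_lt hc]
        have h2 : (j + 1) / b = j / b := by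
          have he : j + 1 = b * (j / b) + (j % b + 1) := by omega
          rw [he, Nat.mul_add_div (by omega), Nat.div_eq_of_lt hc]; omega
        rw [Nat.digits_def' (by omega : 1 < b) (show 0 < j + 1 by omega), h1, h2]
        simp
      · -- carry: last digit was b-1, becomes 0, carry into the higher digits
        rw [List.map_cons, incRev, if_neg (by exact_mod_cast hc)]
        have h1 : (j + 1) % b = 0 := by
          have he : j + 1 = b * (j / b + 1) := by rw [Nat.mul_add, Nat.mul_one]; omega
          rw [he, Nat.mul_mod_right]
        have h2 : (j + 1) / b = j / b + 1 := by
          have he : j + 1 = b * (j / b + 1) := by rw [Nat.mul_add, Nat.mul_one]; omega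
          rw [he, Nat.mul_div_cancel_left _ (by omega : 0 < b)]
        rw [Nat.digits_def' (by omega : 1 < b) (show 0 < j + 1 by omega), h1, h2,
          ih (j / b) (Nat.div_lt_self hj (by omega))]
        simp

theorem incRev_stateOf (b : Nat) (hb : 2 ≤ b) (k : Nat) :
    incRev (b : Int) (stateOf b k) = stateOf b (k + 1) := by
  rcases Nat.eq_zero_or_pos k with hk | hk
  · subst hk
    rw [stateOf, if_pos rfl, stateOf, if_neg (by omega)]
    rw [Nat.digits_of_lt b 1 (by omega) (by omega)]
    simp [incRev]
    omega
  · rw [stateOf, if_neg (Nat.pos_iff_ne_zero.mp hk), stateOf, if_neg (by omega)]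
    exact incRev_digits b hb k

theorem loops_eq (b : Nat) (hb : 2 ≤ b) (maxIdx : Int) :
    ∀ (fuel k : Nat) (nums : List String),
      makeNumsLoop (b : Int) maxIdx fuel (k : Int) nums
        = makeNumsAltLoop (b : Int) maxIdx fuel (stateOf b k) nums := by
  intro fuel
  induction fuel with
  | zero => intro k nums; simp [makeNumsLoop, makeNumsAltLoop]
  | succ f ih =>
    intro k nums
    rw [makeNumsLoop, makeNumsAltLoop]
    have hmap : (fun d => if d ≥ 10 then PySem.Dict.getD pvMap16Alt d "" else PySem.Int.toStr d)
        = dchar := by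
      funext d; rfl
    rw [hmap, make_nth_eq b hb k]
    by_cases hlen : maxIdx < ((nums ++ (stateOf b k).reverse.map dchar).length : Int)
    · simp only [if_pos hlen]
    · simp only [if_neg hlen]
      rw [incRev_stateOf b hb k, show (k : Int) + 1 = ((k + 1 : Nat) : Int) from by push_cast; ring,
        ih (k + 1) _]

-- ===== VERDICT (by name: the statement is the Claim_ definition above) =====
theorem make_nums_spec : Claim_equal_make_nums := by
  intro n t m p _ hpre
  unfold Spec_make_nums
  show makeNumsLoop n ((p - 1) + m * (t - 1)) (((p - 1) + m * (t - 1)).toNat + 1) 0 []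
      = makeNumsAltLoop n ((p - 1) + m * (t - 1)) (((p - 1) + m * (t - 1)).toNat + 1) [0] []
  rcases hpre with hneg | ⟨hn, _⟩
  · -- max_idx ≤ 0: both loops stop after emitting the single "0" of i = 0, for every n
    have h1 : ((p - 1) + m * (t - 1)).toNat = 0 := Int.toNat_of_nonpos hneg
    rw [h1, makeNumsLoop, makeNumsAltLoop]
    have e1 : make_nth 0 n = [PySem.Int.toStr 0] := by simp [make_nth]
    have e2 : ([(0 : Int)].reverse.map (fun d =>
        if d ≥ 10 then PySem.Dict.getD pvMap16Alt d "" else PySem.Int.toStr d))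
        = [PySem.Int.toStr 0] := by norm_num
    rw [e1, e2]
    have hlen : (p - 1) + m * (t - 1) < (([] ++ [PySem.Int.toStr 0]).length : Int) := by
      simp; omega
    rw [if_pos hlen, if_pos hlen]
  · -- 2 ≤ n: the odometer state tracks the base-n digits of the counter i
    have hb : 2 ≤ n.toNat := by omega
    have hn' : ((n.toNat : Nat) : Int) = n := Int.toNat_of_nonneg (by omega)
    rw [← hn']
    rw [show (0 : Int) = ((0 : Nat) : Int) from rfl]
    rw [loops_eq n.toNat hb _ _ 0 []]
    rfl
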